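-- pv_equiv track=rewrite | github.com/Yaminis09/DSA-Python-Questions | Negative_To_The_End_optimised.py | negativeToTheEnd
-- ===== SOURCE A (Python) =====
-- def negativeToTheEnd(v):
--     insert_pos = 0
--
--     for i in range(len(v)):
--         if v[i] > 0:
--             temp = v[i]
--             j = i
--             while j > insert_pos:
--                 v[j] = v[j - 1]
--                 j -= 1
--             v[insert_pos] = temp
--             insert_pos += 1
--
--     return v
-- ===== SOURCE B (Python) =====
-- def negativeToTheEnd(v):
--     # Stable in-place sort on a boolean key: positives (False) first,
--     # non-positives (True) last; stability preserves original order in each group.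
--     v.sort(key=lambda x: x <= 0)
--     return v
-- ===== Notes on version B (the rewrite author's own statement) =====
-- stated objective: idiomatic
-- what changed: Replaced the quadratic insertion-shift loop with a single in-place stable sort keyed on non-positivity (v.sort(key=lambda x: x <= 0)), which yields the same stable partition.
import Mathlib
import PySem

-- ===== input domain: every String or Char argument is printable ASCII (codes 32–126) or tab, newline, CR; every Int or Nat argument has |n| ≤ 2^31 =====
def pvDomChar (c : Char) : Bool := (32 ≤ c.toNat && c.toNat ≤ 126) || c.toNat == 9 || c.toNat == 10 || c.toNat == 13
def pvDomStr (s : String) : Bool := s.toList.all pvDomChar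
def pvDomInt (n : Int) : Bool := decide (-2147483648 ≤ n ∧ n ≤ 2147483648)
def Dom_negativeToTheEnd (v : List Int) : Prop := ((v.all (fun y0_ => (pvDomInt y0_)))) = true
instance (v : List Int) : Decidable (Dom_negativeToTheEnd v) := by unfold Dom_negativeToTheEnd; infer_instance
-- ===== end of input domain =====

-- B replaces A's quadratic insertion-shift loop with one in-place stable sort keyed on
-- non-positivity (idiomatic); both Pythons mutate the argument list in place and return it —
-- the equivalence proved here is about the returned value.

-- ===== PORT A =====
-- the inner 'while j > insert_pos: v[j] = v[j-1]; j -= 1' loop; indices produced by the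
-- loops are always in range, so getD is exact here
def pvShiftWhile (insert_pos : Nat) (v : List Int) (j : Nat) : List Int :=
  if insert_pos < j then pvShiftWhile insert_pos (v.set j (v.getD (j - 1) 0)) (j - 1) else v
termination_by j
decreasing_by omega

def negativeToTheEnd (v : List Int) : List Int :=
  -- for i in range(len(v)): …  (state: the mutated list and insert_pos)
  let r := (List.range v.length).foldl (fun (st : List Int × Nat) i =>
      let v := st.1
      let insert_pos := st.2
      if v.getD i 0 > 0 then
        let temp := v.getD i 0
        let v' := pvShiftWhile insert_pos v i
        (v'.set insert_pos temp, insert_pos + 1)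
      else st) (v, 0)
  r.1

-- ===== PORT B =====
-- v.sort(key=lambda x: x <= 0); return v   (PySem.List.sorted is Python's stable sort)
def negativeToTheEnd_alt (v : List Int) : List Int :=
  PySem.List.sorted v (fun x => decide (x ≤ 0)) false

-- ===== PRECONDITION & SPEC =====
def Spec_negativeToTheEnd (v : List Int) (out : List Int) : Prop := out = negativeToTheEnd_alt v
instance (v : List Int) (out : List Int) : Decidable (Spec_negativeToTheEnd v out) := by unfold Spec_negativeToTheEnd; infer_instance

-- ===== CLAIM (what is proved, stated in full; the proofs are below) =====
def Claim_equal_negativeToTheEnd : Prop := ∀ (v : List Int), Dom_negativeToTheEnd v → Spec_negativeToTheEnd v (negativeToTheEnd v)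

-- ===== LEMMAS AND PROOFS =====

-- generic list-index helpers
theorem pv_getD_off (P t : List Int) (k : Nat) (d : Int) :
    (P ++ t).getD (P.length + k) d = t.getD k d := by
  induction P with
  | nil => simp
  | cons a P ih =>
      have : a :: P ++ t = a :: (P ++ t) := rfl
      rw [this]
      have hlen : (a :: P).length + k = (P.length + k) + 1 := by simp; omega
      rw [hlen, List.getD_cons_succ, ih]

theorem pv_set_off (P t : List Int) (k : Nat) (x : Int) :
    (P ++ t).set (P.length + k) x = P ++ t.set k x := by
  induction P with
  | nil => simp
  | cons a P ih =>
      have hlen : (a :: P).length + k = (P.length + k) + 1 := by simp; omega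
      rw [hlen]
      simp only [List.cons_append, List.set_cons_succ, ih]

-- the shift loop on P ++ N ++ x :: u (j = |P| + |N|, insert_pos = |P|) copies each of
-- N's slots one place right: result is P ++ h :: (N ++ u), h the head of N ++ [x]
theorem pv_shift_eq (P : List Int) (N : List Int) (x : Int) (u : List Int) :
    pvShiftWhile P.length (P ++ (N ++ x :: u)) (P.length + N.length)
      = P ++ (N ++ [x]).headD 0 :: (N ++ u) := by
  induction N using List.reverseRecOn generalizing x u with
  | nil =>
      rw [pvShiftWhile]
      simp
  | append_singleton N' n ih =>
      rw [pvShiftWhile]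
      have hlt : P.length < P.length + (N' ++ [n]).length := by simp
      rw [if_pos hlt]
      have hj : P.length + (N' ++ [n]).length - 1 = P.length + N'.length := by simp
      have hget : (P ++ (N' ++ [n] ++ x :: u)).getD (P.length + N'.length) 0 = n := by
        have : N' ++ [n] ++ x :: u = N' ++ (n :: x :: u) := by simp
        rw [this, pv_getD_off, List.getD_eq_getElem?_getD]
        simp
      have hset : (P ++ (N' ++ [n] ++ x :: u)).set (P.length + (N' ++ [n]).length) n
          = P ++ (N' ++ (n :: n :: u)) := by
        have h1 : N' ++ [n] ++ x :: u = N' ++ (n :: x :: u) := by simp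
        have h2 : P.length + (N' ++ [n]).length = P.length + (N'.length + 1) := by simp
        rw [h1, h2, pv_set_off]
        congr 1
        rw [pv_set_off N' (n :: x :: u) 1 n]
        rfl
      rw [hj, hget, hset]
      have : N' ++ (n :: n :: u) = N' ++ (n :: (n :: u)) := rfl
      rw [this, ih n (n :: u)]
      have hhead : (N' ++ [n]).headD 0 = (N' ++ [n] ++ [x]).headD 0 := by
        cases N' <;> simp
      rw [← hhead]
      simp

-- one outer-loop iteration on a positive element: shift then overwrite insert_pos
theorem pv_shift_set (P N : List Int) (x : Int) (u : List Int) :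
    (pvShiftWhile P.length (P ++ (N ++ x :: u)) (P.length + N.length)).set P.length x
      = P ++ x :: (N ++ u) := by
  rw [pv_shift_eq]
  have h := pv_set_off P ((N ++ [x]).headD 0 :: (N ++ u)) 0 x
  simp only [Nat.add_zero] at h
  rw [h]
  rfl

-- A's loop invariant: with the list in shape P ++ N ++ u (positives P, non-positives N,
-- unprocessed u) and insert_pos = |P|, the remaining iterations stably partition u
theorem pv_loopA (u : List Int) : ∀ (P N : List Int),
    (List.range' (P.length + N.length) u.length).foldl (fun (st : List Int × Nat) i =>
        let v := st.1
        let insert_pos := st.2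
        if v.getD i 0 > 0 then
          let temp := v.getD i 0
          let v' := pvShiftWhile insert_pos v i
          (v'.set insert_pos temp, insert_pos + 1)
        else st) (P ++ (N ++ u), P.length)
      = ((P ++ u.filter (fun x => decide (0 < x))) ++ (N ++ u.filter (fun x => decide (x ≤ 0))),
          (P ++ u.filter (fun x => decide (0 < x))).length) := by
  induction u with
  | nil => intro P N; simp
  | cons x u ih =>
      intro P N
      simp only [List.length_cons]
      rw [List.range'_succ, List.foldl_cons]
      have hget : (P ++ (N ++ x :: u)).getD (P.length + N.length) 0 = x := by
        rw [show P.length + N.length = P.length + N.length from rfl]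
        rw [show N ++ x :: u = N ++ (x :: u) from rfl]
        rw [show P ++ (N ++ (x :: u)) = (P ++ N) ++ (x :: u) by simp]
        have h := pv_getD_off (P ++ N) (x :: u) 0 0
        simp only [Nat.add_zero, List.length_append] at h
        rw [h]
        rfl
      by_cases hx : (0 : Int) < x
      · simp only [hget, hx, if_pos, gt_iff_lt]
        rw [pv_shift_set P N x u]
        have hP' : (P ++ [x]).length = P.length + 1 := by simp
        have hstart : P.length + N.length + 1 = (P ++ [x]).length + N.length := by simp; omega
        have hshape : P ++ x :: (N ++ u) = (P ++ [x]) ++ (N ++ u) := by simp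
        rw [hstart, hshape, ← hP']
        rw [ih (P ++ [x]) N]
        have hfp : (x :: u).filter (fun x => decide (0 < x)) = x :: u.filter (fun x => decide (0 < x)) := by
          simp [hx]
        have hfn : (x :: u).filter (fun x => decide (x ≤ 0)) = u.filter (fun x => decide (x ≤ 0)) := by
          simp [List.filter_cons]; omega
        rw [hfp, hfn]
        simp
      · simp only [hget, gt_iff_lt, hx, if_false]
        have hstart : P.length + N.length + 1 = P.length + (N ++ [x]).length := by simp; omega
        have hshape : P ++ (N ++ x :: u) = P ++ ((N ++ [x]) ++ u) := by simp
        rw [hstart, hshape, ih P (N ++ [x])]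
        have hfp : (x :: u).filter (fun x => decide (0 < x)) = u.filter (fun x => decide (0 < x)) := by
          simp [List.filter_cons]; omega
        have hfn : (x :: u).filter (fun x => decide (x ≤ 0)) = x :: u.filter (fun x => decide (x ≤ 0)) := by
          simp [List.filter_cons]; omega
        rw [hfp, hfn]
        simp

theorem pv_A_eq_partition (v : List Int) :
    negativeToTheEnd v
      = v.filter (fun x => decide (0 < x)) ++ v.filter (fun x => decide (x ≤ 0)) := by
  unfold negativeToTheEnd
  have h0 : List.range v.length = List.range' 0 v.length := by
    rw [List.range_eq_range']
  have := pv_loopA v ([] : List Int) ([] : List Int)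
  simp only [List.nil_append, List.length_nil, Nat.add_zero] at this
  simp only [h0]
  rw [show (0 : Nat) = ([] : List Int).length + ([] : List Int).length from rfl]
  simp only [List.length_nil, Nat.add_zero]
  rw [this]

-- B side: a stable sort on a boolean key is the stable partition
theorem pv_insertBy_false (key : Int → Bool) (x : Int) (hx : key x = false) :
    ∀ (F T : List Int), (∀ y ∈ F, key y = false) → (∀ y ∈ T, key y = true) →
      PySem.List.insertBy (fun a b => decide (key a < key b)) x (F ++ T) = F ++ x :: T := by
  intro F
  induction F with
  | nil =>
      intro T _ hT
      cases T with
      | nil => rfl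
      | cons t T' =>
          have ht : key t = true := hT t (by simp)
          show (if decide (key x < key t) then _ else _) = _
          rw [hx, ht]
          simp
  | cons f F' ih =>
      intro T hF hT
      have hf : key f = false := hF f (by simp)
      show (if decide (key x < key f) then _ else _) = _
      rw [hx, hf]
      simp only [decide_eq_true_eq]
      rw [if_neg (by simp)]
      rw [show F'.append T = F' ++ T from rfl]
      rw [ih T (fun y hy => hF y (by simp [hy])) hT]
      rfl

theorem pv_insertBy_true (key : Int → Bool) (x : Int) (hx : key x = true) (L : List Int) :
    PySem.List.insertBy (fun a b => decide (key a < key b)) x L = L ++ [x] := by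
  apply PySem.List.insertBy_of_forall_not_before
  intro y _
  rw [hx]
  simp only [decide_eq_false_iff_not]
  exact fun h => by cases hky : key y <;> rw [hky] at h <;> exact absurd h (by decide)

theorem pv_sorted_bool (key : Int → Bool) (v : List Int) :
    PySem.List.sorted v key false
      = v.filter (fun x => !key x) ++ v.filter (fun x => key x) := by
  rw [PySem.List.sorted_eq_foldl_insertBy]
  induction v using List.reverseRecOn with
  | nil => rfl
  | append_singleton v' x ih =>
      rw [List.foldl_append, List.foldl_cons, List.foldl_nil, ih]
      cases hx : key x with
      | false =>
          rw [pv_insertBy_false key x hx _ _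
            (fun y hy => by simpa using (List.of_mem_filter hy))
            (fun y hy => by simpa using (List.of_mem_filter hy))]
          simp [List.filter_append, hx]
      | true =>
          rw [pv_insertBy_true key x hx]
          simp [List.filter_append, hx]

theorem pv_B_eq_partition (v : List Int) :
    negativeToTheEnd_alt v
      = v.filter (fun x => decide (0 < x)) ++ v.filter (fun x => decide (x ≤ 0)) := by
  unfold negativeToTheEnd_alt
  rw [pv_sorted_bool (fun x => decide (x ≤ 0)) v]
  congr 1
  apply List.filter_congr
  intro x _
  by_cases h : x ≤ 0
  · simp [h, show ¬ (0:Int) < x by omega]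
  · simp [h, show (0:Int) < x by omega]

-- ===== VERDICT (by name: the statement is the Claim_ definition above) =====
theorem negativeToTheEnd_spec : Claim_equal_negativeToTheEnd := by
  intro v _
  unfold Spec_negativeToTheEnd
  rw [pv_A_eq_partition, pv_B_eq_partition]
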